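-- pv_equiv track=rewrite | github.com/nagyist/BlindSelfPortrait | detect_landmarks_align_overlays.py | label_category
-- ===== SOURCE A (Python) =====
-- def label_category(label: str) -> str | None:
--     normalized = label.lower().strip()
--     if "eye" in normalized or "pupil" in normalized:
--         return "eye"
--     if "top" in normalized and any(
--         token in normalized for token in ("head", "hair", "skull", "forehead")
--     ):
--         return "top_head"
--     if "crown" in normalized:
--         return "top_head"
--     if "chin" in normalized:
--         return "bottom_chin"
--     if "jaw" in normalized and "bottom" in normalized:
--         return "bottom_chin"
--     if "nose" in normalized:
--         return "nose"
--     if "lip" in normalized or "mouth" in normalized: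
--         return "lips"
--     return None
-- ===== SOURCE B (Python) =====
-- _TOKENS = (
--     "eye", "pupil", "top", "head", "hair", "skull", "forehead",
--     "crown", "chin", "jaw", "bottom", "nose", "lip", "mouth",
-- )
--
--
-- def _scan_tokens(s):
--     """One sliding-window pass over s: collect every keyword that starts at some position."""
--     found = set()
--     for i in range(len(s)):
--         for token in _TOKENS:
--             if s.startswith(token, i):
--                 found.add(token)
--     return found
--
--
-- def label_category(label: str) -> str | None:
--     found = _scan_tokens(label.lower().strip())
--     if "eye" in found or "pupil" in found:
--         return "eye"
--     if "top" in found and found & {"head", "hair", "skull", "forehead"}: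
--         return "top_head"
--     if "crown" in found:
--         return "top_head"
--     if "chin" in found:
--         return "bottom_chin"
--     if "jaw" in found and "bottom" in found:
--         return "bottom_chin"
--     if "nose" in found:
--         return "nose"
--     if "lip" in found or "mouth" in found:
--         return "lips"
--     return None
-- ===== Notes on version B (the rewrite author's own statement) =====
-- stated objective: alternative
-- what changed: Instead of running seven independent substring searches, B makes one sliding-window pass over the normalized string collecting the set of keyword tokens that occur, then decides the category by set-membership tests on that found-set.
import Mathlib
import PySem

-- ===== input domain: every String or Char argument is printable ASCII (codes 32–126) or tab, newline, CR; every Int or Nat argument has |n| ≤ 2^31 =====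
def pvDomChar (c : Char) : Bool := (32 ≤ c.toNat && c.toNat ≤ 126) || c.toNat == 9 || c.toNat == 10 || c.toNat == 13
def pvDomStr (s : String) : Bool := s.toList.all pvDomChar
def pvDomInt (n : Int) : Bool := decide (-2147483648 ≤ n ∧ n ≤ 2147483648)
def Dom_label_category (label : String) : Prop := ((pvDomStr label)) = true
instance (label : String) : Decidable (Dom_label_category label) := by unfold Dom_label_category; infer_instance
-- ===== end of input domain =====

-- B replaces A's seven substring searches with one sliding-window scan that collects a found-set of keywords, then decides the category from that set (alternative decomposition).


-- ===== PORT A =====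
def label_category (label : String) : Option String :=
  let normalized := PySem.Str.strip (PySem.Str.lower label)
  if PySem.Str.isIn "eye" normalized || PySem.Str.isIn "pupil" normalized then
    some "eye"
  else if PySem.Str.isIn "top" normalized &&
      (["head", "hair", "skull", "forehead"].any (fun token => PySem.Str.isIn token normalized)) then
    some "top_head"
  else if PySem.Str.isIn "crown" normalized then
    some "top_head"
  else if PySem.Str.isIn "chin" normalized then
    some "bottom_chin"
  else if PySem.Str.isIn "jaw" normalized && PySem.Str.isIn "bottom" normalized then
    some "bottom_chin"
  else if PySem.Str.isIn "nose" normalized then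
    some "nose"
  else if PySem.Str.isIn "lip" normalized || PySem.Str.isIn "mouth" normalized then
    some "lips"
  else
    none

-- ===== PORT B =====
-- the keyword tuple _TOKENS of Source B
def lcTokens : List String :=
  ["eye", "pupil", "top", "head", "hair", "skull", "forehead",
   "crown", "chin", "jaw", "bottom", "nose", "lip", "mouth"]

-- _scan_tokens: one sliding-window pass; s.startswith(token, i) for 0 ≤ i < len(s)
-- is exactly Chars.startswith on (s.drop i) (comment: exact on that index range).
def lcScan (s : List Char) : PySem.Set (List Char) :=
  (List.range s.length).foldl
    (fun found i =>
      lcTokens.foldl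
        (fun found token =>
          if PySem.Chars.startswith (s.drop i) token.toList then
            PySem.Set.add found token.toList
          else found)
        found)
    PySem.Set.empty

def label_category_alt (label : String) : Option String :=
  let found := lcScan (PySem.Chars.strip (PySem.Chars.lower label.toList))
  if PySem.Set.contains found "eye".toList || PySem.Set.contains found "pupil".toList then
    some "eye"
  else if PySem.Set.contains found "top".toList &&
      !(PySem.Set.inter found (PySem.Set.ofList ["head".toList, "hair".toList, "skull".toList, "forehead".toList])).isEmpty then
    some "top_head"
  else if PySem.Set.contains found "crown".toList then
    some "top_head"
  else if PySem.Set.contains found "chin".toList then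
    some "bottom_chin"
  else if PySem.Set.contains found "jaw".toList && PySem.Set.contains found "bottom".toList then
    some "bottom_chin"
  else if PySem.Set.contains found "nose".toList then
    some "nose"
  else if PySem.Set.contains found "lip".toList || PySem.Set.contains found "mouth".toList then
    some "lips"
  else
    none

-- ===== PRECONDITION & SPEC =====
def Spec_label_category (label : String) (out : Option String) : Prop := out = label_category_alt label
instance (label : String) (out : Option String) : Decidable (Spec_label_category label out) := by unfold Spec_label_category; infer_instance

-- ===== CLAIM (what is proved, stated in full; the proofs are below) =====
def Claim_equal_label_category : Prop := ∀ (label : String), Dom_label_category label → Spec_label_category label (label_category label)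

-- ===== LEMMAS AND PROOFS =====

-- membership in the inner fold over the token list
lemma mem_lcScan_inner (toks : List String) (s : List Char) (i : Nat)
    (acc : PySem.Set (List Char)) (x : List Char) :
    x ∈ toks.foldl
        (fun found token =>
          if PySem.Chars.startswith (s.drop i) token.toList then
            PySem.Set.add found token.toList
          else found) acc ↔
      x ∈ acc ∨ ∃ t ∈ toks, x = t.toList ∧ PySem.Chars.startswith (s.drop i) t.toList = true := by
  induction toks generalizing acc with
  | nil => simp
  | cons t ts ih =>
      simp only [List.foldl_cons, ih]
      split_ifs with h
      · rw [PySem.Set.mem_add]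
        constructor
        · rintro (⟨h1 | h1⟩ | ⟨u, hu, hx, hs⟩)
          · exact Or.inl h1
          · exact Or.inr ⟨t, by simp, h1, h⟩
          · exact Or.inr ⟨u, by simp [hu], hx, hs⟩
        · rintro (h1 | ⟨u, hu, hx, hs⟩)
          · exact Or.inl (Or.inl h1)
          · rcases List.mem_cons.mp hu with rfl | hu
            · exact Or.inl (Or.inr hx)
            · exact Or.inr ⟨u, hu, hx, hs⟩
      · constructor
        · rintro (h1 | ⟨u, hu, hx, hs⟩)
          · exact Or.inl h1
          · exact Or.inr ⟨u, by simp [hu], hx, hs⟩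
        · rintro (h1 | ⟨u, hu, hx, hs⟩)
          · exact Or.inl h1
          · rcases List.mem_cons.mp hu with rfl | hu
            · exact absurd hs (by simpa using h)
            · exact Or.inr ⟨u, hu, hx, hs⟩

-- membership in the found-set of the full scan
lemma mem_lcScan (s : List Char) (x : List Char) :
    x ∈ lcScan s ↔ ∃ t ∈ lcTokens, x = t.toList ∧ ∃ i < s.length, PySem.Chars.startswith (s.drop i) t.toList = true := by
  unfold lcScan
  rw [show s.length = s.length from rfl]
  -- generalize over the range fold
  have main : ∀ (is : List Nat) (acc : PySem.Set (List Char)),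
      x ∈ is.foldl (fun found i =>
          lcTokens.foldl (fun found token =>
            if PySem.Chars.startswith (s.drop i) token.toList then
              PySem.Set.add found token.toList else found) found) acc ↔
        x ∈ acc ∨ ∃ t ∈ lcTokens, x = t.toList ∧ ∃ i ∈ is, PySem.Chars.startswith (s.drop i) t.toList = true := by
    intro is
    induction is with
    | nil => simp
    | cons j js ih =>
        intro acc
        simp only [List.foldl_cons, ih, mem_lcScan_inner]
        constructor
        · rintro (⟨h1 | ⟨t, ht, hx, hs⟩⟩ | ⟨t, ht, hx, i, hi, hs⟩)
          · exact Or.inl h1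
          · exact Or.inr ⟨t, ht, hx, j, by simp, hs⟩
          · exact Or.inr ⟨t, ht, hx, i, by simp [hi], hs⟩
        · rintro (h1 | ⟨t, ht, hx, i, hi, hs⟩)
          · exact Or.inl (Or.inl h1)
          · rcases List.mem_cons.mp hi with rfl | hi
            · exact Or.inl (Or.inr ⟨t, ht, hx, hs⟩)
            · exact Or.inr ⟨t, ht, hx, i, hi, hs⟩
  rw [main]
  simp [PySem.Set.empty, List.mem_range]

-- for a nonempty token in the table, found-set membership is exactly substring occurrence
lemma lcScan_contains (s : List Char) (tok : String)
    (htok : tok ∈ lcTokens) (hne : tok.toList ≠ []) :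
    PySem.Set.contains (lcScan s) tok.toList = PySem.Chars.isIn tok.toList s := by
  by_cases h : PySem.Chars.isIn tok.toList s = true
  · have ⟨j, hj⟩ := (PySem.Chars.exists_prefix_drop_iff_isIn tok.toList s).mpr h
    have hjlt : j < s.length := by
      by_contra hge
      have hd : s.drop j = [] := List.drop_eq_nil_of_le (le_of_not_gt hge)
      rw [hd] at hj
      exact hne (List.prefix_nil.mp hj)
    have hmem : tok.toList ∈ lcScan s := by
      rw [mem_lcScan]
      exact ⟨tok, htok, rfl, j, hjlt, (PySem.Chars.startswith_iff ..).mpr hj⟩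
    rw [h]
    exact (PySem.Set.contains_iff ..).mpr hmem
  · have hnot : tok.toList ∉ lcScan s := by
      rw [mem_lcScan]
      rintro ⟨t, ht, hx, i, hi, hs⟩
      have hpref := (PySem.Chars.startswith_iff ..).mp hs
      rw [← hx] at hpref
      exact h ((PySem.Chars.exists_prefix_drop_iff_isIn tok.toList s).mp ⟨i, hpref⟩)
    rw [Bool.eq_false_iff.mpr h, ← Bool.not_eq_true]
    intro hc
    exact hnot ((PySem.Set.contains_iff ..).mp hc)

-- A's 'any(token in normalized for token in (...))' equals B's 'found & {...} nonempty'
lemma lcScan_cond2 (n : List Char) :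
    (!(PySem.Set.inter (lcScan n)
        (PySem.Set.ofList ["head".toList, "hair".toList, "skull".toList, "forehead".toList])).isEmpty)
      = (["head", "hair", "skull", "forehead"].any
          (fun token => PySem.Chars.isIn token.toList n)) := by
  have h1 := lcScan_contains n "head" (by decide) (by decide)
  have h2 := lcScan_contains n "hair" (by decide) (by decide)
  have h3 := lcScan_contains n "skull" (by decide) (by decide)
  have h4 := lcScan_contains n "forehead" (by decide) (by decide)
  rw [Bool.eq_iff_iff, Bool.not_eq_true', List.isEmpty_eq_false_iff]
  constructor
  · intro hne
    obtain ⟨x, hx⟩ := List.exists_mem_of_ne_nil _ hne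
    obtain ⟨hxs, hxt⟩ := (PySem.Set.mem_inter ..).mp hx
    have hxc : PySem.Set.contains (lcScan n) x = true := (PySem.Set.contains_iff ..).mpr hxs
    have hx4 := (PySem.Set.mem_ofList ..).mp hxt
    simp only [List.mem_cons, List.not_mem_nil, or_false] at hx4
    simp only [List.any_eq_true, List.mem_cons]
    rcases hx4 with rfl | rfl | rfl | rfl
    · exact ⟨"head", by simp, by rw [← h1]; exact hxc⟩
    · exact ⟨"hair", by simp, by rw [← h2]; exact hxc⟩
    · exact ⟨"skull", by simp, by rw [← h3]; exact hxc⟩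
    · exact ⟨"forehead", by simp, by rw [← h4]; exact hxc⟩
  · intro hany
    simp only [List.any_eq_true, List.mem_cons, List.not_mem_nil, or_false] at hany
    obtain ⟨t, ht, hin⟩ := hany
    have key : t.toList ∈ PySem.Set.inter (lcScan n)
        (PySem.Set.ofList ["head".toList, "hair".toList, "skull".toList, "forehead".toList]) := by
      refine (PySem.Set.mem_inter ..).mpr ⟨?_, ?_⟩
      · rcases ht with rfl | rfl | rfl | rfl
        · exact (PySem.Set.contains_iff ..).mp (by rw [h1]; exact hin)
        · exact (PySem.Set.contains_iff ..).mp (by rw [h2]; exact hin)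
        · exact (PySem.Set.contains_iff ..).mp (by rw [h3]; exact hin)
        · exact (PySem.Set.contains_iff ..).mp (by rw [h4]; exact hin)
      · rw [PySem.Set.mem_ofList]
        rcases ht with rfl | rfl | rfl | rfl <;> decide
    exact List.ne_nil_of_mem key

-- ===== VERDICT (by name: the statement is the Claim_ definition above) =====
theorem label_category_spec : Claim_equal_label_category := by
  intro label _
  unfold Spec_label_category
  simp only [label_category_alt]
  rw [lcScan_contains _ "eye" (by decide) (by decide),
      lcScan_contains _ "pupil" (by decide) (by decide),
      lcScan_contains _ "top" (by decide) (by decide),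
      lcScan_contains _ "crown" (by decide) (by decide),
      lcScan_contains _ "chin" (by decide) (by decide),
      lcScan_contains _ "jaw" (by decide) (by decide),
      lcScan_contains _ "bottom" (by decide) (by decide),
      lcScan_contains _ "nose" (by decide) (by decide),
      lcScan_contains _ "lip" (by decide) (by decide),
      lcScan_contains _ "mouth" (by decide) (by decide),
      lcScan_cond2]
  unfold label_category
  simp only [pysem]
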